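-- pv_equiv track=rewrite | github.com/Zulko/moviepy | moviepy/tools.py | find_extension
-- ===== SOURCE A (Python) =====
-- extensions_dict = {
--     "mp4": {"type": "video", "codec": ["libx264", "libmpeg4", "aac"]},
--     "mkv": {"type": "video", "codec": ["libx264", "libmpeg4", "aac"]},
--     "ogv": {"type": "video", "codec": ["libtheora"]},
--     "webm": {"type": "video", "codec": ["libvpx"]},
--     "avi": {"type": "video"},
--     "mov": {"type": "video", "codec": ["libx264", "prores"]},
--     "ogg": {"type": "audio", "codec": ["libvorbis"]},
--     "mp3": {"type": "audio", "codec": ["libmp3lame"]},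
--     "wav": {"type": "audio", "codec": ["pcm_s16le", "pcm_s24le", "pcm_s32le"]},
--     "m4a": {"type": "audio", "codec": ["libfdk_aac"]},
--     "flac": {"type": "audio", "codec": ["flac"]},
-- }
--
-- def find_extension(codec):
--     """Returns the correspondent file extension for a codec.
--
--     Parameters
--     ----------
--
--     codec : str
--       Video or audio codec name.
--     """
--     if codec in extensions_dict:
--         # codec is already the extension
--         return codec
--
--     for ext, infos in extensions_dict.items():
--         if codec in infos.get("codec", []):
--             return ext
--     raise ValueError(
--         "The audio_codec you chose is unknown by MoviePy. "
--         "You should report this. In the meantime, you can "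
--         "specify a temp_audiofile with the right extension "
--         "in write_videofile."
--     )
-- ===== SOURCE B (Python) =====
-- extensions_dict = {
--     "mp4": {"type": "video", "codec": ["libx264", "libmpeg4", "aac"]},
--     "mkv": {"type": "video", "codec": ["libx264", "libmpeg4", "aac"]},
--     "ogv": {"type": "video", "codec": ["libtheora"]},
--     "webm": {"type": "video", "codec": ["libvpx"]},
--     "avi": {"type": "video"},
--     "mov": {"type": "video", "codec": ["libx264", "prores"]},
--     "ogg": {"type": "audio", "codec": ["libvorbis"]},
--     "mp3": {"type": "audio", "codec": ["libmp3lame"]},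
--     "wav": {"type": "audio", "codec": ["pcm_s16le", "pcm_s24le", "pcm_s32le"]},
--     "m4a": {"type": "audio", "codec": ["libfdk_aac"]},
--     "flac": {"type": "audio", "codec": ["flac"]},
-- }
--
-- # Reverse index built once: codec name -> extension (first occurrence wins),
-- # extension names map to themselves with precedence over codec entries.
-- _reverse_index = {}
-- for _ext, _infos in extensions_dict.items():
--     for _c in _infos.get("codec", []):
--         _reverse_index.setdefault(_c, _ext)
-- for _ext in extensions_dict:
--     _reverse_index[_ext] = _ext
--
-- def find_extension(codec):
--     """Returns the correspondent file extension for a codec."""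
--     try:
--         return _reverse_index[codec]
--     except KeyError:
--         raise ValueError(
--             "The audio_codec you chose is unknown by MoviePy. "
--             "You should report this. In the meantime, you can "
--             "specify a temp_audiofile with the right extension "
--             "in write_videofile."
--         )
-- ===== Notes on version B (the rewrite author's own statement) =====
-- stated objective: simpler
-- what changed: Replaces the per-call membership test plus linear scan over extensions_dict with a module-level reverse index dict built once (codec -> extension, first occurrence wins, extension keys take precedence), so each call is a single dict lookup.
import Mathlib
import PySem

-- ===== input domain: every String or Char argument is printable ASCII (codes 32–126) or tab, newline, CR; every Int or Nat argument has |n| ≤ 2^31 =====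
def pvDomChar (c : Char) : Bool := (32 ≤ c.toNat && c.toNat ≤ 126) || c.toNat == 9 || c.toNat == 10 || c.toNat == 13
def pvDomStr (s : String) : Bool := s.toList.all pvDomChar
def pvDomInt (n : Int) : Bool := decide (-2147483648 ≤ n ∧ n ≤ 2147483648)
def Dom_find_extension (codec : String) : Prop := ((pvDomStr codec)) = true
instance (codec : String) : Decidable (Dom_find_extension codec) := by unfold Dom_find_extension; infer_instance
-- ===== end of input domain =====

-- B builds the codec→extension reverse index once and answers by a single lookup
-- instead of A's per-call membership test plus linear scan (objective: simpler).

-- extensions_dict, modelled as insertion-ordered (extension, codec-list) pairs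
-- (the "type" field never affects the result; infos.get("codec", []) is the list, [] for "avi")
def pvTable : List (String × List String) :=
  [("mp4", ["libx264", "libmpeg4", "aac"]),
   ("mkv", ["libx264", "libmpeg4", "aac"]),
   ("ogv", ["libtheora"]),
   ("webm", ["libvpx"]),
   ("avi", []),
   ("mov", ["libx264", "prores"]),
   ("ogg", ["libvorbis"]),
   ("mp3", ["libmp3lame"]),
   ("wav", ["pcm_s16le", "pcm_s24le", "pcm_s32le"]),
   ("m4a", ["libfdk_aac"]),
   ("flac", ["flac"])]

-- ===== PORT A =====
-- the 'for ext, infos in extensions_dict.items(): if codec in infos.get("codec", []): return ext' loop;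
-- the empty-list case is the ValueError, excluded by Pre_find_extension ("" is never reached inside Pre_)
def pvScanA (codec : String) : List (String × List String) → String
  | [] => ""
  | (ext, cods) :: rest => if cods.contains codec then ext else pvScanA codec rest

def find_extension (codec : String) : String :=
  if (pvTable.map Prod.fst).contains codec then codec
  else pvScanA codec pvTable

-- ===== PORT B =====
-- module-level reverse index: setdefault each codec to its first extension, then
-- overwrite every extension key with itself
def pvReverseIndex : PySem.Dict String String :=
  let d := pvTable.foldl
    (fun d p => p.2.foldl
      (fun d c => if (PySem.Dict.get? d c).isSome then d else PySem.Dict.insert d c p.1) d)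
    PySem.Dict.empty
  pvTable.foldl (fun d p => PySem.Dict.insert d p.1 p.1) d

-- KeyError → ValueError, excluded by Pre_find_extension ("" is never reached inside Pre_)
def find_extension_alt (codec : String) : String :=
  (PySem.Dict.get? pvReverseIndex codec).getD ""

-- ===== PRECONDITION & SPEC =====
-- Pre_ excludes exactly the codecs unknown to the table, on which the Python A raises ValueError
def Pre_find_extension (codec : String) : Prop :=
  codec ∈ ["mp4", "mkv", "ogv", "webm", "avi", "mov", "ogg", "mp3", "wav", "m4a", "flac",
           "libx264", "libmpeg4", "aac", "libtheora", "libvpx", "prores", "libvorbis",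
           "libmp3lame", "pcm_s16le", "pcm_s24le", "pcm_s32le", "libfdk_aac"]
instance (codec : String) : Decidable (Pre_find_extension codec) := by unfold Pre_find_extension; infer_instance

def pvWitness_find_extension : String := "aac"

def Spec_find_extension (codec : String) (out : String) : Prop := out = find_extension_alt codec
instance (codec : String) (out : String) : Decidable (Spec_find_extension codec out) := by unfold Spec_find_extension; infer_instance

-- ===== CLAIM (what is proved, stated in full; the proofs are below) =====
def Claim_equal_find_extension : Prop := ∀ (codec : String), Dom_find_extension codec → Pre_find_extension codec → Spec_find_extension codec (find_extension codec)

-- ===== LEMMAS AND PROOFS =====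

-- ===== VERDICT (by name: the statement is the Claim_ definition above) =====
set_option maxRecDepth 4000 in
theorem find_extension_spec : Claim_equal_find_extension := by
  intro codec _ hpre
  unfold Pre_find_extension at hpre
  simp only [List.mem_cons, List.not_mem_nil, or_false] at hpre
  rcases hpre with h|h|h|h|h|h|h|h|h|h|h|h|h|h|h|h|h|h|h|h|h|h|h <;> subst h <;> decide
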